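-- pv_equiv track=rewrite | github.com/borisdayma/clip-jax | training/kron.py | _sort_and_group_matrices
-- ===== SOURCE A (Python) =====
-- from typing import Any, List, Optional, Union, Callable, Tuple
-- from collections import defaultdict
--
-- def _sort_and_group_matrices(matrix_shapes: List[Tuple[int, ...]]):
--     indexed_list = list(enumerate(matrix_shapes))
--     sorted_indexed = sorted(indexed_list, key=lambda x: x[1])
--     sorted_shapes = [shape for _, shape in sorted_indexed]
--     change_indices = [original_index for original_index, _ in sorted_indexed]
--     revert_indices = [0] * len(matrix_shapes)
--     for new_pos, (original_index, _) in enumerate(sorted_indexed):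
--         revert_indices[original_index] = new_pos
--     shape_groups = defaultdict(list)
--     for i, shape in enumerate(sorted_shapes):
--         shape_groups[shape].append(i)
--     unique_sorted_shapes = list(shape_groups.keys())
--     return unique_sorted_shapes, dict(shape_groups), change_indices, revert_indices
-- ===== SOURCE B (Python) =====
-- def _sort_and_group_matrices(matrix_shapes):
--     n = len(matrix_shapes)
--     # argsort (stable), then read everything off the index permutation
--     change_indices = sorted(range(n), key=lambda i: matrix_shapes[i])
--     sorted_shapes = [matrix_shapes[i] for i in change_indices]
--     revert_indices = [0] * n
--     for new_pos, original_index in enumerate(change_indices):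
--         revert_indices[original_index] = new_pos
--     # sorted_shapes is sorted, so equal shapes are consecutive: walk runs
--     unique_sorted_shapes = []
--     shape_groups = {}
--     i = 0
--     while i < n:
--         shape = sorted_shapes[i]
--         j = i + 1
--         while j < n and sorted_shapes[j] == shape:
--             j += 1
--         unique_sorted_shapes.append(shape)
--         shape_groups[shape] = list(range(i, j))
--         i = j
--     return unique_sorted_shapes, shape_groups, change_indices, revert_indices
-- ===== Notes on version B (the rewrite author's own statement) =====
-- stated objective: alternative
-- what changed: B replaces A's sort of (index, shape) pairs plus defaultdict grouping by a stable argsort of the indices and a single run-walk over the sorted shape list (equal shapes are consecutive), reading unique shapes and index ranges off consecutive runs instead of hashing every shape.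
import Mathlib
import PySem

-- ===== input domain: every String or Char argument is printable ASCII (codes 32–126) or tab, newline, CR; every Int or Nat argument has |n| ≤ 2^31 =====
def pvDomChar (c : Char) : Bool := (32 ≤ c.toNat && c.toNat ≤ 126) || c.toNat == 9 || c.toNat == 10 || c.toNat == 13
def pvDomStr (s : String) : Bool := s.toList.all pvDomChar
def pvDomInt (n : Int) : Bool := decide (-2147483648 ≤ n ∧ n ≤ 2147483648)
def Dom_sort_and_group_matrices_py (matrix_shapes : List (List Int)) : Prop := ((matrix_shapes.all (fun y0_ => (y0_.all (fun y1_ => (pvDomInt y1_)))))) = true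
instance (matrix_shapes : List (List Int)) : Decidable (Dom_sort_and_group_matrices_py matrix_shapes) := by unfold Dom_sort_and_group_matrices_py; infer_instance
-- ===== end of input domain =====

-- B replaces A's sort-of-(index,shape)-pairs + defaultdict grouping by a stable argsort of the
-- indices plus a single run-walk over the sorted shapes (equal shapes are consecutive); objective: alternative.


-- ===== PORT A =====
def sort_and_group_matrices_py (matrix_shapes : List (List Int)) : List (List Int) × (List (List Int × List Int)) × List Int × List Int :=
  let indexed_list := PySem.List.enumerate matrix_shapes
  let sorted_indexed := PySem.List.sorted indexed_list (fun x => x.2)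
  let sorted_shapes := sorted_indexed.map (fun p => p.2)
  let change_indices := sorted_indexed.map (fun p => p.1)
  let revert_indices := (PySem.List.enumerate sorted_indexed).foldl
      (fun acc p => PySem.List.pySetD acc p.2.1 p.1) (List.replicate matrix_shapes.length (0 : Int))
  let shape_groups := (PySem.List.enumerate sorted_shapes).foldl
      (fun d p => d.modify p.2 [] (· ++ [p.1])) PySem.Dict.empty
  (shape_groups.keys, shape_groups.items, change_indices, revert_indices)

-- ===== PORT B =====
-- run-walk over the (sorted) shape list: the outer while loop of Source B; pos is python's i
def pvRunGroups (sorted_shapes : List (List Int)) (pos : Int) :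
    List (List Int) × List (List Int × List Int) :=
  match sorted_shapes with
  | [] => ([], [])
  | shape :: t =>
      let run := t.takeWhile (fun x => x == shape)
      let j : Int := pos + 1 + run.length
      let rest := pvRunGroups (t.dropWhile (fun x => x == shape)) j
      (shape :: rest.1, (shape, PySem.List.pyRange pos j) :: rest.2)
termination_by sorted_shapes.length
decreasing_by
  exact Nat.lt_succ_of_le (List.length_dropWhile_le _ t)

def sort_and_group_matrices_py_alt (matrix_shapes : List (List Int)) : List (List Int) × (List (List Int × List Int)) × List Int × List Int :=
  let n : Int := matrix_shapes.length
  let change_indices := PySem.List.sorted (PySem.List.pyRange 0 n)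
      (fun i => PySem.List.pyGetD matrix_shapes i [])
  let sorted_shapes := change_indices.map (fun i => PySem.List.pyGetD matrix_shapes i [])
  let revert_indices := (PySem.List.enumerate change_indices).foldl
      (fun acc p => PySem.List.pySetD acc p.2 p.1) (List.replicate matrix_shapes.length (0 : Int))
  let g := pvRunGroups sorted_shapes 0
  (g.1, g.2, change_indices, revert_indices)

-- ===== PRECONDITION & SPEC =====
def Spec_sort_and_group_matrices_py (matrix_shapes : List (List Int)) (out : List (List Int) × (List (List Int × List Int)) × List Int × List Int) : Prop := out = sort_and_group_matrices_py_alt matrix_shapes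
instance (matrix_shapes : List (List Int)) (out : List (List Int) × (List (List Int × List Int)) × List Int × List Int) : Decidable (Spec_sort_and_group_matrices_py matrix_shapes out) := by unfold Spec_sort_and_group_matrices_py; infer_instance

-- ===== CLAIM (what is proved, stated in full; the proofs are below) =====
def Claim_equal_sort_and_group_matrices_py : Prop := ∀ (matrix_shapes : List (List Int)), Dom_sort_and_group_matrices_py matrix_shapes → Spec_sort_and_group_matrices_py matrix_shapes (sort_and_group_matrices_py matrix_shapes)

-- ===== LEMMAS AND PROOFS =====

-- inserting with the same `before` on the mapped list is the map of the insert
theorem pv_insertBy_map {α β : Type} (f : β → α) (bf : α → α → Bool) (bx : β → β → Bool)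
    (h : ∀ a b, bf (f a) (f b) = bx a b) (x : β) (ys : List β) :
    PySem.List.insertBy bf (f x) (ys.map f) = (PySem.List.insertBy bx x ys).map f := by
  induction ys with
  | nil => simp [PySem.List.insertBy]
  | cons y t ih => simp [PySem.List.insertBy, h]; split <;> simp [ih]

-- sorting a mapped list by `key` = mapping the list sorted by the composed key (stability)
theorem pv_sorted_map {α β κ : Type} [LT κ] [DecidableLT κ] (f : β → α) (key : α → κ) (xs : List β) :
    PySem.List.sorted (xs.map f) key = (PySem.List.sorted xs (fun x => key (f x))).map f := by
  show (xs.map f).foldl _ _ = _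
  rw [List.foldl_map]
  have : ∀ (acc : List β), (xs.foldl (fun acc x => PySem.List.insertBy
        (fun a b => decide (key a < key b)) (f x) acc) (acc.map f))
      = (xs.foldl (fun acc x => PySem.List.insertBy (fun a b => decide (key (f a) < key (f b))) x acc) acc).map f := by
    induction xs with
    | nil => intro acc; rfl
    | cons x t ih =>
      intro acc
      simp only [List.foldl_cons]
      rw [pv_insertBy_map f _ _ (fun a b => rfl) x acc, ih]
  simpa using this []

-- `sorted` only looks at `decide (key a < key b)`: equivalent order instances sort identically
theorem pv_sorted_ext {α κ : Type} (i1 i2 : LT κ) (d1 : @DecidableLT κ i1) (d2 : @DecidableLT κ i2)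
    (h : ∀ a b : κ, @LT.lt κ i1 a b ↔ @LT.lt κ i2 a b) (xs : List α) (key : α → κ) :
    @PySem.List.sorted α κ i1 d1 xs key false = @PySem.List.sorted α κ i2 d2 xs key false := by
  have hfun : (fun a b : α => @decide (@LT.lt κ i1 (key a) (key b)) (d1 _ _))
      = (fun a b : α => @decide (@LT.lt κ i2 (key a) (key b)) (d2 _ _)) := by
    funext a b; exact decide_eq_decide.mpr (h _ _)
  rw [@PySem.List.sorted_eq_foldl_insertBy α κ i1 d1 xs key,
     @PySem.List.sorted_eq_foldl_insertBy α κ i2 d2 xs key, hfun]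

theorem pv_enumerate_map {α β : Type} (f : β → α) (l : List β) (s : Int) :
    PySem.List.enumerate (l.map f) s = (PySem.List.enumerate l s).map (fun p => (p.1, f p.2)) := by
  induction l generalizing s with
  | nil => rfl
  | cons x t ih => simp [PySem.List.enumerate_cons, ih]

-- the A-side grouping fold, as used in the proofs
def pvGroupF (pairs : List (Int × List Int)) (d : PySem.Dict (List Int) (List Int)) :
    PySem.Dict (List Int) (List Int) :=
  pairs.foldl (fun d p => d.modify p.2 [] (· ++ [p.1])) d

theorem pv_groupF_run (s : List Int) :
    ∀ (run : List (List Int)), (∀ x ∈ run, x = s) → ∀ (j : Int) (v : List Int),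
    pvGroupF (PySem.List.enumerate run j) (PySem.Dict.mk [(s, v)])
      = PySem.Dict.mk [(s, v ++ PySem.List.pyRange j (j + run.length))] := by
  intro run
  induction run with
  | nil =>
    intro _ j v
    simp [pvGroupF, PySem.List.enumerate]
  | cons x t ih =>
    intro hall j v
    have hx : x = s := hall x (by simp)
    subst hx
    have hstep : (PySem.Dict.mk [(x, v)]).modify x [] (· ++ [j]) = PySem.Dict.mk [(x, v ++ [j])] := by
      simp [PySem.Dict.modify, PySem.Dict.insert, PySem.Dict.contains, PySem.Dict.getD,
        PySem.Dict.get?]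
    simp only [pvGroupF, PySem.List.enumerate_cons, List.foldl_cons]
    have hrec := ih (fun y hy => hall y (by simp [hy])) (j + 1) (v ++ [j])
    simp only [pvGroupF] at hrec
    rw [hstep, hrec]
    have hlen : j + (((x :: t).length : Nat) : Int) = j + 1 + (t.length : Int) := by
      push_cast [List.length_cons]; ring
    rw [hlen, PySem.List.pyRange_one_cons (by omega : j < j + 1 + (t.length : Int))]
    simp

-- a fold whose keys all differ from s leaves a leading (s, v) entry in place
theorem pv_groupF_prefix (s : List Int) :
    ∀ (pairs : List (Int × List Int)), (∀ p ∈ pairs, p.2 ≠ s) →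
    ∀ (v : List Int) (items0 : List (List Int × List Int)),
    (pvGroupF pairs (PySem.Dict.mk ((s, v) :: items0))).items
      = (s, v) :: (pvGroupF pairs (PySem.Dict.mk items0)).items := by
  intro pairs
  induction pairs with
  | nil => intro _ v items0; rfl
  | cons p t ih =>
    intro hall v items0
    have hne : p.2 ≠ s := hall p (by simp)
    have hbeq : (s == p.2) = false := by simpa using Ne.symm hne
    have hbeq' : (p.2 == s) = false := by simpa using hne
    have hgetD : (PySem.Dict.mk ((s, v) :: items0)).getD p.2 ([] : List Int)
        = (PySem.Dict.mk items0).getD p.2 [] := by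
      simp only [PySem.Dict.getD]
      rw [PySem.Dict.get?_mk_cons, hbeq]
      simp
    have hcont : (PySem.Dict.mk ((s, v) :: items0)).contains p.2
        = (PySem.Dict.mk items0).contains p.2 := by
      rw [PySem.Dict.contains_mk, PySem.Dict.contains_mk]
      simp [hbeq]
    have hins : ∀ w, ((PySem.Dict.mk ((s, v) :: items0)).insert p.2 w).items
        = (s, v) :: ((PySem.Dict.mk items0).insert p.2 w).items := by
      intro w
      simp only [PySem.Dict.items_insert, hcont]
      split
      · simp only [List.map_cons, hbeq, Bool.false_eq_true, if_false]
      · simp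
    have hstep : (PySem.Dict.mk ((s, v) :: items0)).modify p.2 [] (· ++ [p.1])
        = PySem.Dict.mk ((s, v) :: ((PySem.Dict.mk items0).modify p.2 [] (· ++ [p.1])).items) := by
      apply PySem.Dict.ext
      simp only [PySem.Dict.modify, hgetD]
      exact hins _
    simp only [pvGroupF, List.foldl_cons, hstep]
    have hrec := ih (fun q hq => hall q (by simp [hq]))
      (v := v) (items0 := ((PySem.Dict.mk items0).modify p.2 [] (· ++ [p.1])).items)
    simpa only [pvGroupF] using hrec

-- in a ≤-sorted list whose elements all dominate s, everything after the s-run differs from s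
theorem pv_dropWhile_ne (s : List Int) :
    ∀ (t : List (List Int)), t.Pairwise (· ≤ ·) → (∀ y ∈ t, s ≤ y) →
    ∀ x ∈ t.dropWhile (fun y => y == s), x ≠ s := by
  intro t
  induction t with
  | nil => simp
  | cons a t ih =>
    intro hp hle x hmem
    by_cases ha : (a == s) = true
    · rw [List.dropWhile_cons, if_pos ha] at hmem
      exact ih hp.tail (fun y hy => hle y (by simp [hy])) x hmem
    · rw [List.dropWhile_cons, if_neg ha] at hmem
      have hane : a ≠ s := by simpa using ha
      have hsa : s < a := lt_of_le_of_ne (hle a (by simp)) (Ne.symm hane)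
      rcases List.mem_cons.mp hmem with h | h
      · exact h ▸ hane
      · have hax : a ≤ x := (List.pairwise_cons.mp hp).1 x h
        exact fun hxs => absurd (hxs ▸ hax) (not_le.mpr hsa)

-- the grouping fold over a ≤-sorted list is exactly the run-walk pvRunGroups
theorem pv_group_eq_runs_aux :
    ∀ (n : Nat) (l : List (List Int)), l.length ≤ n → l.Pairwise (· ≤ ·) → ∀ (i0 : Int),
    (pvGroupF (PySem.List.enumerate l i0) PySem.Dict.empty).items = (pvRunGroups l i0).2 := by
  intro n
  induction n with
  | zero =>
    intro l hl _ i0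
    rw [List.length_eq_zero_iff.mp (Nat.le_zero.mp hl)]
    simp [pvGroupF, PySem.List.enumerate, pvRunGroups, PySem.Dict.empty]
  | succ n ih =>
    intro l hl hp i0
    match l with
    | [] => simp [pvGroupF, PySem.List.enumerate, pvRunGroups, PySem.Dict.empty]
    | shape :: t =>
      have hhead : ∀ y ∈ t, shape ≤ y := (List.pairwise_cons.mp hp).1
      have htail : t.Pairwise (· ≤ ·) := hp.tail
      have hrun : ∀ x ∈ t.takeWhile (fun x => x == shape), x = shape := by
        intro x hx
        have hb := List.mem_takeWhile_imp hx
        exact eq_of_beq hb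
      have hrest_ne : ∀ x ∈ t.dropWhile (fun x => x == shape), x ≠ shape :=
        pv_dropWhile_ne shape t htail hhead
      have hrest_pw : (t.dropWhile (fun x => x == shape)).Pairwise (· ≤ ·) :=
        htail.sublist (List.dropWhile_sublist _)
      have hrest_len : (t.dropWhile (fun x => x == shape)).length ≤ n :=
        le_trans (List.length_dropWhile_le _ t) (by simpa using hl)
      have hsplit : t.takeWhile (fun x => x == shape) ++ t.dropWhile (fun x => x == shape) = t :=
        List.takeWhile_append_dropWhile
      have h1 : PySem.Dict.empty.modify shape ([] : List Int) (· ++ [i0])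
          = PySem.Dict.mk [(shape, [i0])] := by
        simp [PySem.Dict.modify, PySem.Dict.insert, PySem.Dict.contains, PySem.Dict.getD,
          PySem.Dict.get?, PySem.Dict.empty]
      -- left side: peel the head, split the tail at the run boundary
      rw [show PySem.List.enumerate (shape :: t) i0
            = (i0, shape) :: PySem.List.enumerate t (i0 + 1) from PySem.List.enumerate_cons ..]
      simp only [pvGroupF, List.foldl_cons]
      have hL : PySem.List.enumerate t (i0 + 1)
          = PySem.List.enumerate (t.takeWhile (fun x => x == shape)) (i0 + 1)
            ++ PySem.List.enumerate (t.dropWhile (fun x => x == shape))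
               (i0 + 1 + ((t.takeWhile (fun x => x == shape)).length : Int)) := by
        conv_lhs => rw [← hsplit]
        rw [PySem.List.enumerate_append]
      rw [hL, List.foldl_append]
      have hmid := pv_groupF_run shape (t.takeWhile (fun x => x == shape)) hrun (i0 + 1) [i0]
      simp only [pvGroupF] at hmid
      rw [h1, hmid]
      set j : Int := i0 + 1 + ((t.takeWhile (fun x => x == shape)).length : Int) with hj
      have hpairs_ne : ∀ p ∈ PySem.List.enumerate (t.dropWhile (fun x => x == shape)) j,
          p.2 ≠ shape := by
        intro p hpm
        rcases (PySem.List.mem_enumerate_iff _ _ _).mp hpm with ⟨k, hk, rfl⟩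
        exact hrest_ne _ (List.getElem_mem hk)
      have hpre := pv_groupF_prefix shape
        (PySem.List.enumerate (t.dropWhile (fun x => x == shape)) j) hpairs_ne
        ([i0] ++ PySem.List.pyRange (i0 + 1) j)
        []
      simp only [pvGroupF] at hpre
      rw [hpre]
      have hrec := ih (t.dropWhile (fun x => x == shape)) hrest_len hrest_pw j
      simp only [pvGroupF] at hrec
      rw [show (PySem.Dict.mk ([] : List (List Int × List Int))) = PySem.Dict.empty from rfl, hrec]
      have hcons : [i0] ++ PySem.List.pyRange (i0 + 1) j = PySem.List.pyRange i0 j := by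
        rw [PySem.List.pyRange_one_cons (by rw [hj]; omega : i0 < j)]
        rfl
      rw [hcons]
      -- right side
      conv_rhs => rw [pvRunGroups.eq_def]

theorem pv_group_eq_runs (l : List (List Int)) (hp : l.Pairwise (· ≤ ·)) (i0 : Int) :
    (pvGroupF (PySem.List.enumerate l i0) PySem.Dict.empty).items = (pvRunGroups l i0).2 :=
  pv_group_eq_runs_aux l.length l le_rfl hp i0

theorem pv_runs_fst :
    ∀ (n : Nat) (l : List (List Int)), l.length ≤ n → ∀ (i0 : Int),
    (pvRunGroups l i0).1 = (pvRunGroups l i0).2.map (·.1) := by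
  intro n
  induction n with
  | zero =>
    intro l hl i0
    rw [List.length_eq_zero_iff.mp (Nat.le_zero.mp hl)]
    simp [pvRunGroups]
  | succ n ih =>
    intro l hl i0
    match l with
    | [] => simp [pvRunGroups]
    | shape :: t =>
      rw [pvRunGroups]
      simp only [List.map_cons]
      have hrec := ih (t.dropWhile (fun x => x == shape))
        (le_trans (List.length_dropWhile_le _ t) (by simpa using hl))
        (i0 + 1 + ((t.takeWhile (fun x => x == shape)).length : Int))
      rw [hrec]

-- ===== VERDICT (by name: the statement is the Claim_ definition above) =====
theorem sort_and_group_matrices_py_spec : Claim_equal_sort_and_group_matrices_py := by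
  intro xs _
  show sort_and_group_matrices_py xs = sort_and_group_matrices_py_alt xs
  have hsi : PySem.List.sorted (PySem.List.enumerate xs) (fun x => x.2)
      = (PySem.List.sorted (PySem.List.pyRange 0 ((xs.length : Int)))
          (fun i => PySem.List.pyGetD xs i [])).map (fun j => (j, PySem.List.pyGetD xs j [])) := by
    rw [PySem.List.enumerate_eq_map_pyRange xs []]
    simp only [PySem.List.len_eq]
    exact pv_sorted_map _ _ _
  have hpw : ((PySem.List.sorted (PySem.List.pyRange 0 ((xs.length : Int)))
        (fun i => PySem.List.pyGetD xs i [])).map (fun i => PySem.List.pyGetD xs i [])).Pairwise (· ≤ ·) := by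
    have hbr := pv_sorted_ext _ _ (fun a b => (a.decidableLT b))
        (@LinearOrder.toDecidableLT _ (List.instLinearOrder)) (fun a b => Iff.rfl)
        (PySem.List.pyRange 0 ((xs.length : Int))) (fun i => PySem.List.pyGetD xs i [])
    have hpw0 := PySem.List.sorted_map_key_pairwise (κ := List Int)
        (PySem.List.pyRange 0 ((xs.length : Int))) (fun i => PySem.List.pyGetD xs i [])
    rw [← hbr] at hpw0
    exact hpw0
  have hG := pv_group_eq_runs _ hpw 0
  simp only [pvGroupF] at hG
  simp only [sort_and_group_matrices_py, sort_and_group_matrices_py_alt]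
  refine Prod.ext ?_ (Prod.ext ?_ (Prod.ext ?_ ?_))
  · -- unique_sorted_shapes: dict keys = run-walk first components
    show ((PySem.List.enumerate ((PySem.List.sorted (PySem.List.enumerate xs) (fun x => x.2)).map
        (fun p => p.2))).foldl (fun d p => d.modify p.2 [] (· ++ [p.1])) PySem.Dict.empty).items.map (·.1) = _
    rw [hsi, List.map_map]
    calc (((PySem.List.enumerate ((PySem.List.sorted (PySem.List.pyRange 0 ((xs.length : Int)))
              (fun i => PySem.List.pyGetD xs i [])).map (fun i => PySem.List.pyGetD xs i []))).foldl
            (fun d p => d.modify p.2 [] (· ++ [p.1])) PySem.Dict.empty).items).map (·.1)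
        = ((pvRunGroups ((PySem.List.sorted (PySem.List.pyRange 0 ((xs.length : Int)))
              (fun i => PySem.List.pyGetD xs i [])).map (fun i => PySem.List.pyGetD xs i [])) 0).2).map (·.1) := by
          rw [hG]
      _ = _ := (pv_runs_fst _ _ le_rfl 0).symm
  · -- shape_groups items = run-walk group list
    show ((PySem.List.enumerate ((PySem.List.sorted (PySem.List.enumerate xs) (fun x => x.2)).map
        (fun p => p.2))).foldl (fun d p => d.modify p.2 [] (· ++ [p.1])) PySem.Dict.empty).items = _
    rw [hsi, List.map_map]
    exact hG
  · -- change_indices: first components of the sorted pairs = the argsort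
    show (PySem.List.sorted (PySem.List.enumerate xs) (fun x => x.2)).map (fun p => p.1) = _
    rw [hsi, List.map_map]
    exact List.map_id' _
  · -- revert_indices: the two scatter folds coincide
    show (PySem.List.enumerate (PySem.List.sorted (PySem.List.enumerate xs) (fun x => x.2))).foldl
        (fun acc p => PySem.List.pySetD acc p.2.1 p.1) (List.replicate xs.length (0 : Int)) = _
    rw [hsi, pv_enumerate_map, List.foldl_map]
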